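-- pv_equiv track=rewrite | github.com/EAHervert/enas-networks | utilities/utilities/functions.py | macro_array
-- ===== SOURCE A (Python) =====
-- def macro_array(k, kernel_array, down_array, up_array):
--     array = []
--
--     i1 = 0
--     i2 = 0
--     i3 = 0
--
--     for i in range(3 * k):
--         if (i + 1) % 3 != 0:
--             array.append(kernel_array[i1])
--             i1 += 1
--         else:
--             array.append(down_array[i2])
--             i2 += 1
--
--     for i in range(2):
--         array.append(kernel_array[i1])
--         i1 += 1
--
--     for i in range(3 * k):
--         if i % 3 == 0:
--             array.append(up_array[i3])
--             i3 += 1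
--
--         else:
--             array.append(kernel_array[i1])
--             i1 += 1
--
--     return array
-- ===== SOURCE B (Python) =====
-- def macro_array(k, kernel_array, down_array, up_array):
--     m = max(k, 0)
--
--     def pick(j):
--         # closed-form source of output position j
--         if j < 3 * m:                       # first block: kernel,kernel,down per group
--             if j % 3 == 2:
--                 return down_array[j // 3]
--             return kernel_array[j - j // 3]
--         if j < 3 * m + 2:                   # the two standalone kernels
--             return kernel_array[2 * m + (j - 3 * m)]
--         t = j - (3 * m + 2)                 # last block: up,kernel,kernel per group
--         if t % 3 == 0:
--             return up_array[t // 3]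
--         return kernel_array[2 * m + 2 + t - t // 3 - 1]
--
--     return [pick(j) for j in range(6 * m + 2)]
-- ===== Notes on version B (the rewrite author's own statement) =====
-- stated objective: alternative
-- what changed: Instead of A's three sequential cursor-advancing passes that append element by element, B computes a closed-form position map: for each output index j of range(6*max(k,0)+2) it derives arithmetically (via j//3 and j%3 on the block-relative offset) which source array and which index feed that position, and builds the result as a single comprehension with no cursors or appends.
import Mathlib
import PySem

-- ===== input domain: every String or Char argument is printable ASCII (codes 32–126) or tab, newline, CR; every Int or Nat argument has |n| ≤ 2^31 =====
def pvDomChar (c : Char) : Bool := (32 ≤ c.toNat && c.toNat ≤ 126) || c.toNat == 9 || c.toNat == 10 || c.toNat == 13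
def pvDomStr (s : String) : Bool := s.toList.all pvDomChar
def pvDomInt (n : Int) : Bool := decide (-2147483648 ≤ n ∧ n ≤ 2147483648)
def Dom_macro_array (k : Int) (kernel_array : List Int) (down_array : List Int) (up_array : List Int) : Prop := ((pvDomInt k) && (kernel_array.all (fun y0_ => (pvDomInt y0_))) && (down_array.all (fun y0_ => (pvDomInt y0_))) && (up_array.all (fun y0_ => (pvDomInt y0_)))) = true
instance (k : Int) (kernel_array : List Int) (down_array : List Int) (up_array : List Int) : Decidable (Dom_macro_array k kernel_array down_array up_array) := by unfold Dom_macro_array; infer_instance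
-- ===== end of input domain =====

-- B replaces A's three cursor-advancing append passes by a closed-form position map: each
-- output index j of range(6*max(k,0)+2) is sent arithmetically to its source element
-- (objective: alternative). Return values only.

-- ===== PORT A =====
-- state = (array, i1, i2, i3), exactly Python A's locals; pyGetD is safe under Pre_ (indices in range)
def macro_array (k : Int) (kernel_array : List Int) (down_array : List Int) (up_array : List Int) : List Int :=
  let s1 : List Int × Int × Int × Int :=
    (PySem.List.pyRange 0 (3 * k) 1).foldl
      (fun st i =>
        if PySem.Int.mod (i + 1) 3 ≠ 0 then
          (st.1 ++ [PySem.List.pyGetD kernel_array st.2.1 0], st.2.1 + 1, st.2.2.1, st.2.2.2)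
        else
          (st.1 ++ [PySem.List.pyGetD down_array st.2.2.1 0], st.2.1, st.2.2.1 + 1, st.2.2.2))
      ([], 0, 0, 0)
  let s2 : List Int × Int × Int × Int :=
    (PySem.List.pyRange 0 2 1).foldl
      (fun st _ =>
        (st.1 ++ [PySem.List.pyGetD kernel_array st.2.1 0], st.2.1 + 1, st.2.2.1, st.2.2.2))
      s1
  let s3 : List Int × Int × Int × Int :=
    (PySem.List.pyRange 0 (3 * k) 1).foldl
      (fun st i =>
        if PySem.Int.mod i 3 = 0 then
          (st.1 ++ [PySem.List.pyGetD up_array st.2.2.2 0], st.2.1, st.2.2.1, st.2.2.2 + 1)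
        else
          (st.1 ++ [PySem.List.pyGetD kernel_array st.2.1 0], st.2.1 + 1, st.2.2.1, st.2.2.2))
      s2
  s3.1

-- ===== PORT B =====
-- Source B's helper pick(j): closed-form source of output position j
def pickB (m : Int) (kernel_array : List Int) (down_array : List Int) (up_array : List Int) (j : Int) : Int :=
  if j < 3 * m then
    if PySem.Int.mod j 3 = 2 then PySem.List.pyGetD down_array (PySem.Int.floordiv j 3) 0
    else PySem.List.pyGetD kernel_array (j - PySem.Int.floordiv j 3) 0
  else if j < 3 * m + 2 then
    PySem.List.pyGetD kernel_array (2 * m + (j - 3 * m)) 0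
  else
    let t := j - (3 * m + 2)
    if PySem.Int.mod t 3 = 0 then PySem.List.pyGetD up_array (PySem.Int.floordiv t 3) 0
    else PySem.List.pyGetD kernel_array (2 * m + 2 + t - PySem.Int.floordiv t 3 - 1) 0

def macro_array_alt (k : Int) (kernel_array : List Int) (down_array : List Int) (up_array : List Int) : List Int :=
  let m := max k 0
  (PySem.List.pyRange 0 (6 * m + 2) 1).map (pickB m kernel_array down_array up_array)

-- ===== PRECONDITION & SPEC =====
-- exactly the inputs on which Python A returns without IndexError:
-- for k ≥ 0 it reads kernel_array[0..4k+1], down_array[0..k-1], up_array[0..k-1];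
-- for k < 0 the two big loops are empty and only kernel_array[0..1] is read.
def Pre_macro_array (k : Int) (kernel_array : List Int) (down_array : List Int) (up_array : List Int) : Prop :=
  (0 ≤ k ∧ 4 * k + 2 ≤ (kernel_array.length : Int) ∧ k ≤ (down_array.length : Int) ∧ k ≤ (up_array.length : Int))
  ∨ (k < 0 ∧ 2 ≤ kernel_array.length)
instance (k : Int) (kernel_array : List Int) (down_array : List Int) (up_array : List Int) : Decidable (Pre_macro_array k kernel_array down_array up_array) := by unfold Pre_macro_array; infer_instance

def pvWitness_macro_array : Int × List Int × List Int × List Int :=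
  (2, [1, 2, 3, 4, 5, 6, 7, 8, 9, 10], [11, 12], [13, 14])

def Spec_macro_array (k : Int) (kernel_array : List Int) (down_array : List Int) (up_array : List Int) (out : List Int) : Prop := out = macro_array_alt k kernel_array down_array up_array
instance (k : Int) (kernel_array : List Int) (down_array : List Int) (up_array : List Int) (out : List Int) : Decidable (Spec_macro_array k kernel_array down_array up_array out) := by unfold Spec_macro_array; infer_instance

-- ===== CLAIM (what is proved, stated in full; the proofs are below) =====
def Claim_equal_macro_array : Prop := ∀ (k : Int) (kernel_array : List Int) (down_array : List Int) (up_array : List Int), Dom_macro_array k kernel_array down_array up_array → Pre_macro_array k kernel_array down_array up_array → Spec_macro_array k kernel_array down_array up_array (macro_array k kernel_array down_array up_array)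

-- ===== LEMMAS AND PROOFS =====

-- splitting range(0, 3(m+1)) after the first 3m elements
theorem range3_split (m : Nat) :
    PySem.List.pyRange 0 (3 * ((m : Int) + 1)) 1
      = PySem.List.pyRange 0 (3 * (m : Int)) 1 ++ [3 * (m : Int), 3 * (m : Int) + 1, 3 * (m : Int) + 2] := by
  rw [show (3 * ((m : Int) + 1)) = 3 * (m : Int) + 3 by ring]
  rw [PySem.List.pyRange_one_append 0 (3 * (m : Int)) (3 * (m : Int) + 3) (by omega) (by omega)]
  congr 1
  rw [PySem.List.pyRange_one]
  rw [show (3 * (m : Int) + 3 - 3 * (m : Int)).toNat = 3 by omega]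
  norm_num [List.range_succ]

-- normalising the Python mod/floordiv by 3 to Int's % and /
theorem mod3 (a : Int) : PySem.Int.mod a 3 = a % 3 :=
  PySem.Int.mod_eq_emod_of_pos (by norm_num)
theorem div3 (a : Int) : PySem.Int.floordiv a 3 = a / 3 :=
  PySem.Int.floordiv_eq_ediv_of_pos (by norm_num)

-- pickB evaluated at the three positions of group p of the first block (p < m)
theorem pickB_g0 (m : Int) (kernel_array down_array up_array : List Int) (p : Int) (_hp : 0 ≤ p) (hpm : p < m) :
    pickB m kernel_array down_array up_array (3 * p) = PySem.List.pyGetD kernel_array (2 * p) 0 := by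
  simp only [pickB, mod3, div3]
  rw [if_pos (by omega), if_neg (by omega)]
  congr 1; omega

theorem pickB_g1 (m : Int) (kernel_array down_array up_array : List Int) (p : Int) (_hp : 0 ≤ p) (hpm : p < m) :
    pickB m kernel_array down_array up_array (3 * p + 1) = PySem.List.pyGetD kernel_array (2 * p + 1) 0 := by
  simp only [pickB, mod3, div3]
  rw [if_pos (by omega), if_neg (by omega)]
  congr 1; omega

theorem pickB_g2 (m : Int) (kernel_array down_array up_array : List Int) (p : Int) (_hp : 0 ≤ p) (hpm : p < m) :
    pickB m kernel_array down_array up_array (3 * p + 2) = PySem.List.pyGetD down_array p 0 := by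
  simp only [pickB, mod3, div3]
  rw [if_pos (by omega), if_pos (by omega)]
  congr 1; omega

-- A's first loop over range(3n) equals the pickB map over the first 3n positions (n ≤ m)
theorem loop1_map (m : Int) (kernel_array down_array up_array : List Int) (n : Nat) (hnm : (n : Int) ≤ m) :
    (PySem.List.pyRange 0 (3 * (n : Int)) 1).foldl
      (fun (st : List Int × Int × Int × Int) i =>
        if PySem.Int.mod (i + 1) 3 ≠ 0 then
          (st.1 ++ [PySem.List.pyGetD kernel_array st.2.1 0], st.2.1 + 1, st.2.2.1, st.2.2.2)
        else
          (st.1 ++ [PySem.List.pyGetD down_array st.2.2.1 0], st.2.1, st.2.2.1 + 1, st.2.2.2))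
      ([], 0, 0, 0)
    = ((PySem.List.pyRange 0 (3 * (n : Int)) 1).map (pickB m kernel_array down_array up_array),
       2 * (n : Int), (n : Int), 0) := by
  induction n with
  | zero => simp [PySem.List.pyRange_one_eq_nil]
  | succ p ih =>
    have h3 : ((p + 1 : Nat) : Int) = (p : Int) + 1 := by push_cast; ring
    have e0 := pickB_g0 m kernel_array down_array up_array (p : Int) (by positivity) (by omega)
    have e1 := pickB_g1 m kernel_array down_array up_array (p : Int) (by positivity) (by omega)
    have e2 := pickB_g2 m kernel_array down_array up_array (p : Int) (by positivity) (by omega)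
    have d1 : ¬ ((3:Int) ∣ 3 * (p : Int) + 1) := by omega
    have d2 : ¬ ((3:Int) ∣ 3 * (p : Int) + 1 + 1) := by omega
    have d3 : ((3:Int) ∣ 3 * (p : Int) + 2 + 1) := by omega
    rw [h3, range3_split p, List.foldl_append, ih (by omega), List.map_append]
    simp [List.foldl, d2, d3, e0, e1, e2, List.append_assoc]
    omega

-- A's third loop over range(3n) from (arr, c, i2, 0), mapped form
theorem loop3_map (kernel_array up_array : List Int) (n : Nat) (arr : List Int) (c i2 : Int) :
    (PySem.List.pyRange 0 (3 * (n : Int)) 1).foldl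
      (fun (st : List Int × Int × Int × Int) i =>
        if PySem.Int.mod i 3 = 0 then
          (st.1 ++ [PySem.List.pyGetD up_array st.2.2.2 0], st.2.1, st.2.2.1, st.2.2.2 + 1)
        else
          (st.1 ++ [PySem.List.pyGetD kernel_array st.2.1 0], st.2.1 + 1, st.2.2.1, st.2.2.2))
      (arr, c, i2, 0)
    = (arr ++ (PySem.List.pyRange 0 (3 * (n : Int)) 1).map
         (fun t => if PySem.Int.mod t 3 = 0 then PySem.List.pyGetD up_array (PySem.Int.floordiv t 3) 0
                   else PySem.List.pyGetD kernel_array (c + t - PySem.Int.floordiv t 3 - 1) 0),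
       c + 2 * (n : Int), i2, (n : Int)) := by
  induction n with
  | zero => simp [PySem.List.pyRange_one_eq_nil]
  | succ p ih =>
    have h3 : ((p + 1 : Nat) : Int) = (p : Int) + 1 := by push_cast; ring
    have m0 : ((3:Int) ∣ 3 * (p : Int)) := by omega
    have m1 : ¬ ((3:Int) ∣ 3 * (p : Int) + 1) := by omega
    have m2 : ¬ ((3:Int) ∣ 3 * (p : Int) + 2) := by omega
    have f0 : (3 * (p : Int)) / 3 = (p : Int) := by omega
    have f1 : c + (3 * (p : Int) + 1) - (3 * (p : Int) + 1) / 3 - 1 = c + 2 * (p : Int) := by omega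
    have f2 : c + (3 * (p : Int) + 2) - (3 * (p : Int) + 2) / 3 - 1 = c + 2 * (p : Int) + 1 := by omega
    rw [h3, range3_split p, List.foldl_append, ih, List.map_append]
    simp [List.foldl, m0, m1, m2, f0, f1, f2, List.append_assoc]
    omega

-- a range starting at a is the shifted image of a range starting at 0
theorem pyRange_shift (a len : Int) :
    PySem.List.pyRange a (a + len) 1 = (PySem.List.pyRange 0 len 1).map (fun t => a + t) := by
  rw [PySem.List.pyRange_one, PySem.List.pyRange_one, List.map_map]
  rw [show (a + len - a).toNat = (len - 0).toNat by omega]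
  apply List.map_congr_left
  intro x _
  simp

-- ===== VERDICT (by name: the statement is the Claim_ definition above) =====
theorem macro_array_spec : Claim_equal_macro_array := by
  intro k kernel_array down_array up_array _ _
  unfold Spec_macro_array macro_array macro_array_alt
  have hmid : PySem.List.pyRange 0 2 1 = [0, 1] := by decide
  rcases le_or_gt 0 k with hk | hk
  · obtain ⟨n, rfl⟩ : ∃ n : Nat, k = (n : Int) := ⟨k.toNat, (Int.toNat_of_nonneg hk).symm⟩
    have hmax : max (n : Int) 0 = (n : Int) := by omega
    rw [hmax]
    -- split B's range(6n+2) into the three blocks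
    have hsplitA : PySem.List.pyRange 0 (6 * (n : Int) + 2) 1
        = PySem.List.pyRange 0 (3 * (n : Int)) 1
          ++ [3 * (n : Int), 3 * (n : Int) + 1]
          ++ PySem.List.pyRange (3 * (n : Int) + 2) (6 * (n : Int) + 2) 1 := by
      rw [PySem.List.pyRange_one_append 0 (3 * (n : Int)) (6 * (n : Int) + 2) (by omega) (by omega),
          PySem.List.pyRange_one_append (3 * (n : Int)) (3 * (n : Int) + 2) (6 * (n : Int) + 2)
            (by omega) (by omega)]
      rw [show (3 * (n : Int) + 2) = (3 * (n : Int) + 1) + 1 by ring,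
          PySem.List.pyRange_one_succ_right (by omega), PySem.List.pyRange_one_singleton]
      simp
    rw [loop1_map (n : Int) kernel_array down_array up_array n le_rfl, hmid]
    simp only [List.foldl]
    rw [show ∀ x : Int, x + 1 + 1 = x + 2 from fun x => by ring]
    rw [loop3_map kernel_array up_array n _ (2 * (n : Int) + 2) (n : Int)]
    rw [hsplitA, List.map_append, List.map_append]
    -- middle two positions of the pickB map
    have hb0 : pickB (n : Int) kernel_array down_array up_array (3 * (n : Int))
        = PySem.List.pyGetD kernel_array (2 * (n : Int)) 0 := by
      unfold pickB
      rw [if_neg (by omega), if_pos (by omega)]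
      congr 1; ring
    have hb1 : pickB (n : Int) kernel_array down_array up_array (3 * (n : Int) + 1)
        = PySem.List.pyGetD kernel_array (2 * (n : Int) + 1) 0 := by
      unfold pickB
      rw [if_neg (by omega), if_pos (by omega)]
      congr 1; ring
    -- third block of the pickB map = the shifted per-position function of loop3
    have hthird : (PySem.List.pyRange (3 * (n : Int) + 2) (6 * (n : Int) + 2) 1).map
          (pickB (n : Int) kernel_array down_array up_array)
        = (PySem.List.pyRange 0 (3 * (n : Int)) 1).map
            (fun t => if PySem.Int.mod t 3 = 0 then PySem.List.pyGetD up_array (PySem.Int.floordiv t 3) 0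
                      else PySem.List.pyGetD kernel_array (2 * (n : Int) + 2 + t - PySem.Int.floordiv t 3 - 1) 0) := by
      rw [show (6 * (n : Int) + 2) = (3 * (n : Int) + 2) + 3 * (n : Int) by ring,
          pyRange_shift (3 * (n : Int) + 2) (3 * (n : Int)), List.map_map]
      apply List.map_congr_left
      intro t ht
      rw [PySem.List.mem_pyRange_one] at ht
      show pickB (n : Int) kernel_array down_array up_array (3 * (n : Int) + 2 + t) = _
      unfold pickB
      rw [if_neg (by omega), if_neg (by omega)]
      rw [show (3 * (n : Int) + 2 + t - (3 * (n : Int) + 2)) = t by ring]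
    rw [hthird, List.map, List.map, List.map, hb0, hb1]
    simp [List.append_assoc]
  · have hA : PySem.List.pyRange 0 (3 * k) 1 = [] := PySem.List.pyRange_one_eq_nil (by omega)
    have hmax : max k 0 = 0 := by omega
    rw [hmax]
    have hB : PySem.List.pyRange 0 (6 * (0:Int) + 2) 1 = [0, 1] := by decide
    simp only [hA, hB, hmid, List.foldl, List.map]
    unfold pickB
    norm_num
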